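-- pv_equiv track=rewrite | github.com/Philser/advent-of-code-25 | day2/day2.py | is_repeating_sequence
-- ===== SOURCE A (Python) =====
-- def find_divisors(number):
--     divisors = [1]
--     for i in range(2, number): # TODO: Boo, lazy! Make this more performant!
--         if number % i == 0:
--             divisors.append(i)
--
--
--     divisors.sort(reverse=True)
--     return divisors
--
-- def is_repeating_sequence(number: int):
--     stringified = str(number)
--     str_len = len(stringified)
--     divisors = find_divisors(str_len)
--     for div in divisors:
--         parts = int(str_len / div)
--         for i in range(0, parts):
--             if stringified[div * i:div * i + div] != stringified[div * (i + 1):div * (i + 1) + div]: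
--                 break
--             if i == parts - 2:
--                 return True
--
--     return False
-- ===== SOURCE B (Python) =====
-- def is_repeating_sequence(number: int):
--     s = str(number)
--     return s in (s + s)[1:-1]
-- ===== Notes on version B (the rewrite author's own statement) =====
-- stated objective: idiomatic
-- what changed: Replaces the divisor enumeration plus nested block-comparison loops with the standard string-periodicity trick: s repeats a proper block iff s occurs in (s+s)[1:-1], a single substring-membership test.
import Mathlib
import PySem

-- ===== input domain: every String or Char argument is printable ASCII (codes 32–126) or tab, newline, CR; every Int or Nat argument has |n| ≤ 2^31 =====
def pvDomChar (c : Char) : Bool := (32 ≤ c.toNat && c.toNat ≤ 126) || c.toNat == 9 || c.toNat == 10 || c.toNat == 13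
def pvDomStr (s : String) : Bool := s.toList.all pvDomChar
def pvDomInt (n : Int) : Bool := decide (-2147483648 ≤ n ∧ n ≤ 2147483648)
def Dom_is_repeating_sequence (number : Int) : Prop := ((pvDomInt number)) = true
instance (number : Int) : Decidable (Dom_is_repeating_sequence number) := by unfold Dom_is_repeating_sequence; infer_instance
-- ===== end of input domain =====

-- B replaces A's divisor enumeration + nested block-comparison loops by the standard
-- periodicity trick 's in (s+s)[1:-1]' (idiomatic single membership test); return values are equal.

-- ===== PORT A =====
-- find_divisors: list [1] ++ divisors of number in [2, number), then .sort(reverse=True)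
def pvFindDivisors (number : Int) : List Int :=
  let divisors := (PySem.List.pyRange 2 number 1).foldl
    (fun divisors i => if PySem.Int.mod number i == 0 then divisors ++ [i] else divisors) [1]
  PySem.List.sorted divisors (fun x => x) true

-- the inner 'for i in range(0, parts)' loop: false = fell out / broke, true = 'return True'
def pvInner (s : List Char) (dv parts : Int) : List Int → Bool
  | [] => false
  | i :: rest =>
    if PySem.List.slice s (some (dv*i)) (some (dv*i+dv)) ≠ PySem.List.slice s (some (dv*(i+1))) (some (dv*(i+1)+dv)) then false
    else if i == parts - 2 then true
    else pvInner s dv parts rest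

-- the outer 'for div in divisors' loop
def pvOuter (s : List Char) (strLen : Int) : List Int → Bool
  | [] => false
  | dv :: rest =>
    -- int(str_len / div): exact here — every dv in the list divides strLen, both positive and tiny,
    -- so Python's float division is exact and int() agrees with floor division
    let parts := PySem.Int.floordiv strLen dv
    if pvInner s dv parts (PySem.List.pyRange 0 parts 1) then true else pvOuter s strLen rest

def is_repeating_sequence (number : Int) : Bool :=
  let stringified := PySem.Int.toChars number
  let str_len : Int := stringified.length
  pvOuter stringified str_len (pvFindDivisors str_len)

-- ===== PORT B =====
def is_repeating_sequence_alt (number : Int) : Bool :=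
  let s := PySem.Int.toChars number
  PySem.Chars.isIn s (PySem.List.slice (s ++ s) (some 1) (some (-1)))

-- ===== PRECONDITION & SPEC =====
def Spec_is_repeating_sequence (number : Int) (out : Bool) : Prop := out = is_repeating_sequence_alt number
instance (number : Int) (out : Bool) : Decidable (Spec_is_repeating_sequence number out) := by unfold Spec_is_repeating_sequence; infer_instance

-- ===== CLAIM (what is proved, stated in full; the proofs are below) =====
def Claim_equal_is_repeating_sequence : Prop := ∀ (number : Int), Dom_is_repeating_sequence number → Spec_is_repeating_sequence number (is_repeating_sequence number)

-- ===== LEMMAS AND PROOFS =====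

-- l is periodic with period d (on the non-wrapping part)
def pvPer (l : List Char) (d : Nat) : Prop := ∀ i, i + d < l.length → l[i]? = l[i+d]?

-- l is fixed by cyclic rotation by r
def pvRot (l : List Char) (r : Nat) : Prop := ∀ k, k < l.length → l[k]? = l[(k+r) % l.length]?

-- l is a repetition of a proper block whose length divides l.length
def pvHasP (l : List Char) : Prop := ∃ d, d ∣ l.length ∧ 0 < d ∧ d < l.length ∧ pvPer l d

def pvBlockEq (s : List Char) (dv i : Int) : Prop :=
  PySem.List.slice s (some (dv*i)) (some (dv*i+dv)) = PySem.List.slice s (some (dv*(i+1))) (some (dv*(i+1)+dv))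

-- m % n = m - n in the wrap-around band
lemma pv_mod_shift (n m : Nat) (h1 : n ≤ m) (h2 : m < 2*n) : m % n = m - n := by
  rw [Nat.mod_eq_sub_mod h1]
  exact Nat.mod_eq_of_lt (by omega)

lemma pv_toDigitsCore_ne_nil (b : Nat) : ∀ (fuel n : Nat) (c : Char) (cs : List Char),
    Nat.toDigitsCore b fuel n (c :: cs) ≠ [] := by
  intro fuel
  induction fuel with
  | zero => intro n c cs; simp [Nat.toDigitsCore]
  | succ t ih =>
    intro n c cs
    simp only [Nat.toDigitsCore]
    split
    · simp
    · exact ih _ _ _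

lemma pv_toChars_ne_nil (z : Int) : PySem.Int.toChars z ≠ [] := by
  have hd : ∀ n : Nat, Nat.toDigits 10 n ≠ [] := by
    intro n
    simp only [Nat.toDigits, Nat.toDigitsCore]
    split
    · simp
    · exact pv_toDigitsCore_ne_nil 10 _ _ _ _
  unfold PySem.Int.toChars
  split
  · simp
  · exact hd _

lemma pv_divisors_mem (N : Int) (x : Int) :
    x ∈ pvFindDivisors N ↔ x = 1 ∨ (2 ≤ x ∧ x < N ∧ PySem.Int.mod N x = 0) := by
  unfold pvFindDivisors
  rw [PySem.List.mem_sorted]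
  rw [show (fun (divisors : List Int) (i : Int) =>
        if PySem.Int.mod N i == 0 then divisors ++ [i] else divisors) =
      (fun acc x => if (fun i => PySem.Int.mod N i == 0) x = true then acc ++ [(fun (i : Int) => i) x] else acc)
    from by funext a b; simp]
  rw [PySem.List.foldl_append_if]
  simp only [List.mem_append, List.mem_singleton, List.mem_map, List.mem_filter,
    PySem.List.mem_pyRange_one, beq_iff_eq]
  constructor
  · rintro (h1 | ⟨y, ⟨⟨hy1, hy2⟩, hy3⟩, rfl⟩)
    · exact Or.inl h1
    · exact Or.inr ⟨hy1, hy2, hy3⟩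
  · rintro (h1 | ⟨h1, h2, h3⟩)
    · exact Or.inl h1
    · exact Or.inr ⟨x, ⟨⟨h1, h2⟩, h3⟩, rfl⟩

lemma pv_outer_iff (s : List Char) (N : Int) (lst : List Int) :
    pvOuter s N lst = true ↔
      ∃ dv ∈ lst, pvInner s dv (PySem.Int.floordiv N dv)
        (PySem.List.pyRange 0 (PySem.Int.floordiv N dv) 1) = true := by
  induction lst with
  | nil => simp [pvOuter]
  | cons dv rest ih =>
    simp only [pvOuter]
    by_cases h : pvInner s dv (PySem.Int.floordiv N dv)
        (PySem.List.pyRange 0 (PySem.Int.floordiv N dv) 1) = true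
    · simp [h]
    · simp only [h, if_false, Bool.false_eq_true, ih]
      constructor
      · rintro ⟨d, hd1, hd2⟩; exact ⟨d, List.mem_cons_of_mem _ hd1, hd2⟩
      · rintro ⟨d, hd1, hd2⟩
        rcases List.mem_cons.mp hd1 with rfl | hmem
        · exact absurd hd2 h
        · exact ⟨d, hmem, hd2⟩

lemma pv_inner_iff (s : List Char) (dv parts : Int) :
    ∀ (m : Nat) (k : Int), (parts - k).toNat ≤ m →
      (pvInner s dv parts (PySem.List.pyRange k parts 1) = true ↔
        (k ≤ parts - 2 ∧ ∀ i : Int, k ≤ i → i ≤ parts - 2 → pvBlockEq s dv i)) := by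
  intro m
  induction m with
  | zero =>
    intro k hk
    have hpk : parts ≤ k := by omega
    rw [PySem.List.pyRange_one_eq_nil hpk]
    simp only [pvInner, Bool.false_eq_true, false_iff]
    rintro ⟨h1, -⟩; omega
  | succ t ih =>
    intro k hk
    by_cases hpk : parts ≤ k
    · rw [PySem.List.pyRange_one_eq_nil hpk]
      simp only [pvInner, Bool.false_eq_true, false_iff]
      rintro ⟨h1, -⟩; omega
    · push_neg at hpk
      rw [PySem.List.pyRange_one_cons hpk]
      by_cases hbe : pvBlockEq s dv k
      · unfold pvBlockEq at hbe
        by_cases hk2 : k = parts - 2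
        · simp only [pvInner, ne_eq]
          rw [if_neg (not_not_intro hbe), if_pos (show (k == parts - 2) = true by simp [hk2])]
          refine iff_of_true rfl ⟨by omega, fun i h1 h2 => ?_⟩
          have hik : i = k := by omega
          rw [hik]
          exact hbe
        · simp only [pvInner, ne_eq]
          rw [if_neg (not_not_intro hbe),
            if_neg (show ¬ ((k == parts - 2) = true) by simp [hk2])]
          rw [ih (k+1) (by omega)]
          constructor
          · rintro ⟨h1, h2⟩
            refine ⟨by omega, fun i hi1 hi2 => ?_⟩
            by_cases hik : i = k
            · subst hik; exact hbe
            · exact h2 i (by omega) hi2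
          · rintro ⟨h1, h2⟩
            exact ⟨by omega, fun i hi1 hi2 => h2 i (by omega) hi2⟩
      · unfold pvBlockEq at hbe
        simp only [pvInner, ne_eq]
        rw [if_pos hbe]
        simp only [Bool.false_eq_true, false_iff]
        rintro ⟨h1, h2⟩
        exact hbe (h2 k le_rfl h1)

lemma pv_takeDrop_eq (l : List Char) (a b d : Nat)
    (ha : a + d ≤ l.length) (hb : b + d ≤ l.length) :
    ((l.drop a).take d = (l.drop b).take d) ↔ ∀ j, j < d → l[a+j]? = l[b+j]? := by
  constructor
  · intro h j hj
    have := congrArg (fun t => t[j]?) h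
    simpa [List.getElem?_take, List.getElem?_drop, hj] using this
  · intro h
    apply List.ext_getElem?
    intro i
    by_cases hi : i < d
    · simpa [List.getElem?_take, List.getElem?_drop, hi] using h i hi
    · simp [List.getElem?_take, hi]

lemma pv_blockEq_nat (l : List Char) (d i : Nat) :
    pvBlockEq l (d : Int) (i : Int) ↔ (l.drop (d*i)).take d = (l.drop (d*(i+1))).take d := by
  unfold pvBlockEq
  have g1 := PySem.List.slice_natCast l (d*i) (d*i+d)
  have g2 := PySem.List.slice_natCast l (d*(i+1)) (d*(i+1)+d)
  push_cast at g1 g2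
  rw [g1, g2]
  have f1 : d*i + d - d*i = d := by omega
  have f2 : d*(i+1) + d - d*(i+1) = d := by omega
  rw [f1, f2]

lemma pv_blocks_iff_per (l : List Char) (d : Nat) (hd : 0 < d) (hdvd : d ∣ l.length)
    (h2 : 2 ≤ l.length / d) :
    (∀ i : Nat, i ≤ l.length / d - 2 → (l.drop (d*i)).take d = (l.drop (d*(i+1))).take d)
      ↔ pvPer l d := by
  have hn : d * (l.length / d) = l.length := Nat.mul_div_cancel' hdvd
  constructor
  · intro h m hm
    have hdm : d * (m / d) + m % d = m := Nat.div_add_mod m d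
    have hjd : m % d < d := Nat.mod_lt _ hd
    have hexp1 : d * (m / d + 1) = d * (m / d) + d := by ring
    have hexp2 : d * (m / d + 2) = d * (m / d) + 2 * d := by ring
    have hile : m / d ≤ l.length / d - 2 := by
      by_contra hc
      push_neg at hc
      have h1 : l.length / d - 1 ≤ m / d := by omega
      have h2' : d * (l.length / d - 1) ≤ d * (m / d) := Nat.mul_le_mul_left d h1
      have h3 : d * (l.length / d - 1) + d = d * (l.length / d) := by
        rw [← Nat.mul_succ]
        congr 1
        omega
      omega
    have h4 : d * (m / d + 2) ≤ d * (l.length / d) := Nat.mul_le_mul_left d (by omega)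
    have hblock := h (m / d) hile
    rw [pv_takeDrop_eq l (d*(m/d)) (d*(m/d+1)) d (by omega) (by omega)] at hblock
    have hres := hblock (m % d) hjd
    rw [show d*(m/d) + m % d = m from hdm,
      show d*(m/d+1) + m % d = m + d from by omega] at hres
    exact hres
  · intro per i hile
    have hexp1 : d * (i + 1) = d * i + d := by ring
    have hexp2 : d * (i + 2) = d * i + 2 * d := by ring
    have h4 : d * (i + 2) ≤ d * (l.length / d) := Nat.mul_le_mul_left d (by omega)
    rw [pv_takeDrop_eq l (d*i) (d*(i+1)) d (by omega) (by omega)]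
    intro j hj
    rw [show d*(i+1) + j = (d*i + j) + d from by omega]
    exact per (d*i + j) (by omega)

lemma pv_A_iff (l : List Char) (hl : 0 < l.length) :
    (pvOuter l (l.length : Int) (pvFindDivisors (l.length : Int)) = true) ↔ pvHasP l := by
  rw [pv_outer_iff]
  constructor
  · rintro ⟨dv, hmem, hin⟩
    rw [pv_divisors_mem] at hmem
    have hdv1 : 1 ≤ dv := by
      rcases hmem with h | ⟨h, -, -⟩ <;> omega
    obtain ⟨d, rfl⟩ : ∃ d : Nat, dv = (d : Int) := ⟨dv.toNat, by omega⟩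
    have hdpos : 0 < d := by exact_mod_cast hdv1
    have hdvd : d ∣ l.length := by
      rcases hmem with h | ⟨-, -, h⟩
      · have h1 : d = 1 := by exact_mod_cast h
        simp [h1]
      · rw [PySem.Int.mod_eq_zero_iff_dvd] at h
        exact_mod_cast h
    rw [PySem.Int.floordiv_natCast] at hin
    rw [pv_inner_iff l (d : Int) ((l.length / d : Nat) : Int)
      ((((l.length / d : Nat) : Int)) - 0).toNat 0 (by omega)] at hin
    obtain ⟨hk, hblocks⟩ := hin
    have hp2 : 2 ≤ l.length / d := by
      have : (2 : Int) ≤ ((l.length / d : Nat) : Int) := by omega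
      exact_mod_cast this
    have hn : d * (l.length / d) = l.length := Nat.mul_div_cancel' hdvd
    have hdlt : d < l.length := by
      have := Nat.mul_le_mul_left d hp2
      omega
    refine ⟨d, hdvd, hdpos, hdlt, ?_⟩
    rw [← pv_blocks_iff_per l d hdpos hdvd hp2]
    intro i hile
    rw [← pv_blockEq_nat]
    exact hblocks (i : Int) (by omega) (by push_cast; omega)
  · rintro ⟨d, hdvd, hdpos, hdlt, per⟩
    have hn : d * (l.length / d) = l.length := Nat.mul_div_cancel' hdvd
    have hp2 : 2 ≤ l.length / d := by
      by_contra hc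
      push_neg at hc
      have hb2 : d * (l.length / d) ≤ d * 1 := Nat.mul_le_mul_left d (by omega)
      omega
    refine ⟨(d : Int), ?_, ?_⟩
    · rw [pv_divisors_mem]
      by_cases hd1 : d = 1
      · exact Or.inl (by simp [hd1])
      · refine Or.inr ⟨by omega, by exact_mod_cast hdlt, ?_⟩
        rw [PySem.Int.mod_eq_zero_iff_dvd]
        exact_mod_cast hdvd
    · rw [PySem.Int.floordiv_natCast]
      rw [pv_inner_iff l (d : Int) ((l.length / d : Nat) : Int)
        ((((l.length / d : Nat) : Int)) - 0).toNat 0 (by omega)]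
      refine ⟨by push_cast; omega, fun i hi1 hi2 => ?_⟩
      obtain ⟨iN, rfl⟩ : ∃ iN : Nat, i = (iN : Int) := ⟨i.toNat, by omega⟩
      rw [pv_blockEq_nat]
      rw [← pv_blocks_iff_per l d hdpos hdvd hp2] at per
      exact per iN (by push_cast at hi2 ⊢; omega)

lemma pv_rot_add (l : List Char) (a b : Nat) (ha : pvRot l a) (hb : pvRot l b) :
    pvRot l (a + b) := by
  intro k hk
  have hn : 0 < l.length := by omega
  have h1 := ha k hk
  have h2 := hb ((k + a) % l.length) (Nat.mod_lt _ hn)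
  rw [h1, h2]
  congr 1
  conv_rhs => rw [show k + (a + b) = (k + a) + b from by ring]
  rw [Nat.add_mod (k+a) b, Nat.add_mod ((k+a) % l.length) b,
    Nat.mod_mod_of_dvd _ (dvd_refl _)]

lemma pv_rot_mul (l : List Char) (r t : Nat) (h : pvRot l r) : pvRot l (t * r) := by
  induction t with
  | zero => intro k hk; simp [Nat.mod_eq_of_lt hk]
  | succ u ih =>
    rw [show (u + 1) * r = u * r + r from by ring]
    exact pv_rot_add l (u*r) r ih h

lemma pv_rot_inv (l : List Char) (r : Nat) (h : pvRot l r) :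
    pvRot l (l.length - r % l.length) := by
  intro k hk
  have hn : 0 < l.length := by omega
  have hk' : (k + (l.length - r % l.length)) % l.length < l.length := Nat.mod_lt _ hn
  have h1 := h _ hk'
  have hdm := Nat.div_add_mod r l.length
  have hrm : r % l.length < l.length := Nat.mod_lt _ hn
  have key : ((k + (l.length - r % l.length)) % l.length + r) % l.length = k := by
    rw [Nat.add_mod ((k + (l.length - r % l.length)) % l.length) r,
      Nat.mod_mod_of_dvd _ (dvd_refl _), ← Nat.add_mod]
    rw [show k + (l.length - r % l.length) + r = k + l.length * (1 + r / l.length) from by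
      have hexp : l.length * (1 + r / l.length) = l.length + l.length * (r / l.length) := by ring
      omega]
    rw [Nat.add_mul_mod_self_left]
    exact Nat.mod_eq_of_lt hk
  rw [key] at h1
  exact h1.symm

lemma pv_rot_descend (l : List Char) :
    ∀ r, 0 < r → r < l.length → pvRot l r →
      ∃ d, d ∣ l.length ∧ 0 < d ∧ d < l.length ∧ pvRot l d := by
  intro r
  induction r using Nat.strong_induction_on with
  | _ r ih =>
    intro hr hrn hrot
    by_cases hmod : l.length % r = 0
    · exact ⟨r, Nat.dvd_of_mod_eq_zero hmod, hr, hrn, hrot⟩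
    · have hr'lt : l.length % r < r := Nat.mod_lt _ hr
      have hr'pos : 0 < l.length % r := Nat.pos_of_ne_zero hmod
      have hdm := Nat.div_add_mod l.length r
      have hrot' : pvRot l (l.length % r) := by
        have h1 : pvRot l (l.length / r * r) := pv_rot_mul l r (l.length / r) hrot
        have h2 := pv_rot_inv l (l.length / r * r) h1
        have e1 : (l.length / r * r) % l.length = l.length - l.length % r := by
          have hcomm : l.length / r * r = r * (l.length / r) := Nat.mul_comm _ _
          have : l.length / r * r = l.length - l.length % r := by omega
          rw [this]
          exact Nat.mod_eq_of_lt (by omega)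
        rw [e1] at h2
        have e2 : l.length - (l.length - l.length % r) = l.length % r := by omega
        rwa [e2] at h2
      exact ih (l.length % r) hr'lt hr'pos (by omega) hrot'

lemma pv_per_of_rot (l : List Char) (d : Nat) (h : pvRot l d) : pvPer l d := by
  intro i hi
  have hres := h i (by omega)
  rwa [Nat.mod_eq_of_lt hi] at hres

lemma pv_rot_of_per (l : List Char) (d : Nat) (hd : 0 < d) (hdvd : d ∣ l.length)
    (hlt : d < l.length) (h : pvPer l d) : pvRot l d := by
  have chain : ∀ m i, i + m * d < l.length → l[i]? = l[i + m*d]? := by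
    intro m
    induction m with
    | zero => simp
    | succ t ihm =>
      intro i hbound
      rw [show (t+1) * d = t*d + d from by ring] at hbound ⊢
      have h1 := ihm i (by omega)
      have h2 := h (i + t*d) (by omega)
      rw [h1, show i + (t*d + d) = i + t*d + d from by ring]
      exact h2
  intro k hk
  by_cases hkd : k + d < l.length
  · rw [Nat.mod_eq_of_lt hkd]
    exact h k hkd
  · push_neg at hkd
    have hmul : d * (l.length / d) = l.length := Nat.mul_div_cancel' hdvd
    have hq1 : 1 ≤ l.length / d := (Nat.one_le_div_iff hd).mpr (le_of_lt hlt)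
    have hmd : (l.length / d - 1) * d = l.length - d := by
      have e : (l.length / d - 1) * d + 1 * d = (l.length / d) * d := by
        rw [← Nat.add_mul]
        congr 1
        omega
      have e2 : (l.length / d) * d = l.length := by rw [Nat.mul_comm]; exact hmul
      omega
    have hshift : (k + d) % l.length = k + d - l.length :=
      pv_mod_shift l.length (k+d) hkd (by omega)
    rw [hshift]
    have hch := chain (l.length / d - 1) (k + d - l.length) (by rw [hmd]; omega)
    rw [hmd, show k + d - l.length + (l.length - d) = k from by omega] at hch
    exact hch.symm

lemma pv_exists_rot_iff_hasP (l : List Char) :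
    (∃ r, 0 < r ∧ r < l.length ∧ pvRot l r) ↔ pvHasP l := by
  constructor
  · rintro ⟨r, hr, hrn, hrot⟩
    obtain ⟨d, hdvd, hdpos, hdlt, hrotd⟩ := pv_rot_descend l r hr hrn hrot
    exact ⟨d, hdvd, hdpos, hdlt, pv_per_of_rot l d hrotd⟩
  · rintro ⟨d, hdvd, hdpos, hdlt, per⟩
    exact ⟨d, hdpos, hdlt, pv_rot_of_per l d hdpos hdvd hdlt per⟩

lemma pv_doubling_getElem (l : List Char) (m : Nat) (hm : m < 2 * l.length) :
    (l ++ l)[m]? = l[m % l.length]? := by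
  by_cases h : m < l.length
  · rw [List.getElem?_append_left h, Nat.mod_eq_of_lt h]
  · push_neg at h
    rw [List.getElem?_append_right h, pv_mod_shift l.length m h hm]

lemma pv_slice_doubling (l : List Char) (hl : 0 < l.length) :
    PySem.List.slice (l ++ l) (some 1) (some (-1)) =
      ((l ++ l).drop 1).take (2 * l.length - 2) := by
  have hmin : min 1 (l.length + l.length) = 1 := by omega
  have harith : l.length + l.length - 1 - 1 = 2 * l.length - 2 := by omega
  simp [PySem.List.slice, List.length_append, hmin, harith, List.drop_one]

lemma pv_B_iff (l : List Char) (hl : 0 < l.length) :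
    (PySem.Chars.isIn l (PySem.List.slice (l ++ l) (some 1) (some (-1))) = true) ↔
      ∃ r, 0 < r ∧ r < l.length ∧ pvRot l r := by
  rw [pv_slice_doubling l hl, ← PySem.Chars.exists_prefix_drop_iff_isIn]
  have hbiglen : (((l ++ l).drop 1).take (2*l.length - 2)).length = 2*l.length - 2 := by
    rw [List.length_take, List.length_drop, List.length_append]
    omega
  constructor
  · rintro ⟨j, hpre⟩
    have hlen := hpre.length_le
    rw [List.length_drop, hbiglen] at hlen
    have hj : j ≤ l.length - 2 := by omega
    have hn2 : 2 ≤ l.length := by omega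
    refine ⟨j + 1, by omega, by omega, ?_⟩
    rw [List.prefix_iff_eq_take] at hpre
    intro k hk
    have hpt := congrArg (fun t => t[k]?) hpre
    simp only [List.getElem?_take, List.getElem?_drop, hk, if_true] at hpt
    rw [hpt]
    have hjk : j + k < 2*l.length - 2 := by omega
    simp only [List.getElem?_take, List.getElem?_drop, hjk, if_true]
    rw [show 1 + (j + k) = k + (j+1) from by ring]
    rw [pv_doubling_getElem l (k + (j+1)) (by omega)]
  · rintro ⟨r, hr, hrn, hrot⟩
    have hn2 : 2 ≤ l.length := by omega
    refine ⟨r - 1, ?_⟩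
    rw [List.prefix_iff_eq_take]
    apply List.ext_getElem?
    intro i
    by_cases hi : i < l.length
    · simp only [List.getElem?_take, List.getElem?_drop, hi, if_true]
      have hji : r - 1 + i < 2*l.length - 2 := by omega
      simp only [hji, if_true]
      rw [show 1 + (r - 1 + i) = i + r from by omega]
      rw [pv_doubling_getElem l (i + r) (by omega)]
      exact hrot i hi
    · push_neg at hi
      rw [List.getElem?_eq_none (by omega)]
      rw [List.getElem?_eq_none]
      simp only [List.length_take, List.length_drop, hbiglen]
      omega

-- ===== VERDICT (by name: the statement is the Claim_ definition above) =====
theorem is_repeating_sequence_spec : Claim_equal_is_repeating_sequence := by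
  intro number _
  unfold Spec_is_repeating_sequence is_repeating_sequence is_repeating_sequence_alt
  have hl : 0 < (PySem.Int.toChars number).length :=
    List.length_pos_iff.mpr (pv_toChars_ne_nil number)
  have hA := pv_A_iff (PySem.Int.toChars number) hl
  have hB := pv_B_iff (PySem.Int.toChars number) hl
  rw [pv_exists_rot_iff_hasP] at hB
  rw [← hB] at hA
  show pvOuter (PySem.Int.toChars number) ((PySem.Int.toChars number).length : Int)
      (pvFindDivisors ((PySem.Int.toChars number).length : Int)) =
    PySem.Chars.isIn (PySem.Int.toChars number)
      (PySem.List.slice (PySem.Int.toChars number ++ PySem.Int.toChars number) (some 1) (some (-1)))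
  rcases hx : pvOuter (PySem.Int.toChars number) ((PySem.Int.toChars number).length : Int)
      (pvFindDivisors ((PySem.Int.toChars number).length : Int)) with _ | _ <;>
    rcases hy : PySem.Chars.isIn (PySem.Int.toChars number)
      (PySem.List.slice (PySem.Int.toChars number ++ PySem.Int.toChars number) (some 1) (some (-1))) with _ | _ <;>
      rw [hx, hy] at hA <;> simp_all
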